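-- pv_equiv track=rewrite | github.com/AdamZhouSE/pythonHomework | Code/CodeRecords/2206/60710/320767.py | recursiveAdd
-- ===== SOURCE A (Python) =====
-- def recursiveAdd(start,i,n):
--     if i==n+1:
--         return 0
--     else:
--         element=1
--         for j in range(0,i):
--             element=element*start
--             start=start+1
--         return element+recursiveAdd(start,i+1,n)
-- ===== SOURCE B (Python) =====
-- def recursiveAdd(start, i, n):
--     total = 0
--     for k in range(i, n + 1):
--         block = 1
--         for _ in range(k):
--             block *= start
--             start += 1
--         total += block
--     return total
-- ===== Notes on version B (the rewrite author's own statement) =====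
-- stated objective: simpler
-- what changed: Replaces the linear recursion with a single iterative for-loop over the block indices, accumulating each block product into a running total; Pre_ excludes exactly the inputs where A raises RecursionError (i > n+1, and recursion depth n+1-i > 997 under CPython's default limit).
import Mathlib
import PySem

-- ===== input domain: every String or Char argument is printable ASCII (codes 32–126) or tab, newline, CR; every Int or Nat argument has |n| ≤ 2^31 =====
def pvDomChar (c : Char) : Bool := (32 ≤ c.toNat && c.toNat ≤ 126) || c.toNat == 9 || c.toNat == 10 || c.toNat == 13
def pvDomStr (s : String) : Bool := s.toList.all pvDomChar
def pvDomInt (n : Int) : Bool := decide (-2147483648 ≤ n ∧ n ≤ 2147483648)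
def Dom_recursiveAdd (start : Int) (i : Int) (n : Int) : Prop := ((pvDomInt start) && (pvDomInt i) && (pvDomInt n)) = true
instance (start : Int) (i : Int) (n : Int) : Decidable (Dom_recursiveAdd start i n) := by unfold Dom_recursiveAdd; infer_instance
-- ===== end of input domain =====

-- B replaces A's linear recursion by a single iterative loop accumulating the block
-- products into a running total (objective: simpler — flat loop, no recursion).

-- ===== PORT A =====
-- A's recursion, with fuel (n+1-i).toNat; under Pre_ (i ≤ n+1) the fuel runs out exactly
-- when i = n+1, so this is a step-for-step transcription of A on every admitted input.
def recAddGo (fuel : Nat) (start : Int) (i : Int) (n : Int) : Int :=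
  match fuel with
  | 0 => 0
  | f + 1 =>
    if i = n + 1 then 0
    else
      -- for j in range(0, i): element = element*start; start = start+1
      let p := (PySem.List.pyRange 0 i 1).foldl
        (fun (p : Int × Int) _ => (p.1 * p.2, p.2 + 1)) (1, start)
      p.1 + recAddGo f p.2 (i + 1) n

def recursiveAdd (start : Int) (i : Int) (n : Int) : Int :=
  recAddGo (n + 1 - i).toNat start i n

-- ===== PORT B =====
-- total = 0; for k in range(i, n+1): block = 1; for _ in range(k): block *= start; start += 1; total += block
def recursiveAdd_alt (start : Int) (i : Int) (n : Int) : Int :=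
  ((PySem.List.pyRange i (n + 1) 1).foldl
    (fun (st : Int × Int) k =>
      let p := (PySem.List.pyRange 0 k 1).foldl
        (fun (p : Int × Int) _ => (p.1 * p.2, p.2 + 1)) (1, st.2)
      (st.1 + p.1, p.2))
    (0, start)).1

-- ===== PRECONDITION & SPEC =====
-- Pre_ excludes exactly the inputs on which the Python A raises RecursionError: i > n+1
-- (the recursion never reaches its base case) and recursion depths n+1-i beyond CPython's
-- default recursion limit of 1000 (the exact admissible depth, 997, was measured by running A).
def Pre_recursiveAdd (start : Int) (i : Int) (n : Int) : Prop := i ≤ n + 1 ∧ n + 1 - i ≤ 997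
instance (start : Int) (i : Int) (n : Int) : Decidable (Pre_recursiveAdd start i n) := by unfold Pre_recursiveAdd; infer_instance
def pvWitness_recursiveAdd : Int × Int × Int := (2, 1, 4)

def Spec_recursiveAdd (start : Int) (i : Int) (n : Int) (out : Int) : Prop := out = recursiveAdd_alt start i n
instance (start : Int) (i : Int) (n : Int) (out : Int) : Decidable (Spec_recursiveAdd start i n out) := by unfold Spec_recursiveAdd; infer_instance

-- ===== CLAIM =====
def Claim_equal_recursiveAdd : Prop := ∀ (start : Int) (i : Int) (n : Int), Dom_recursiveAdd start i n → Pre_recursiveAdd start i n → Spec_recursiveAdd start i n (recursiveAdd start i n)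

-- ===== LEMMAS AND PROOFS =====

-- A's fuel recursion, accumulated into `total`, equals B's outer fold.
theorem recAdd_outer (f : Nat) : ∀ (start i n total : Int), i + (f : Int) = n + 1 →
    total + recAddGo f start i n
    = ((PySem.List.pyRange i (n + 1) 1).foldl
        (fun (st : Int × Int) k =>
          let p := (PySem.List.pyRange 0 k 1).foldl
            (fun (p : Int × Int) _ => (p.1 * p.2, p.2 + 1)) (1, st.2)
          (st.1 + p.1, p.2))
        (total, start)).1 := by
  induction f with
  | zero =>
    intro start i n total h
    have : n + 1 ≤ i := by omega
    rw [PySem.List.pyRange_one_eq_nil this]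
    simp [recAddGo]
  | succ f ih =>
    intro start i n total h
    have hlt : i < n + 1 := by omega
    have hne : i ≠ n + 1 := by omega
    rw [PySem.List.pyRange_one_cons hlt]
    simp only [recAddGo, if_neg hne, List.foldl_cons]
    rw [← ih _ (i + 1) n _ (by omega)]
    ring

-- ===== VERDICT =====
theorem recursiveAdd_spec : Claim_equal_recursiveAdd := by
  intro start i n _ hpre
  obtain ⟨hpre, -⟩ := hpre
  unfold Spec_recursiveAdd recursiveAdd recursiveAdd_alt
  have hf : i + (((n + 1 - i).toNat : Nat) : Int) = n + 1 := by
    have : (0 : Int) ≤ n + 1 - i := by exact sub_nonneg.mpr hpre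
    omega
  have := recAdd_outer (n + 1 - i).toNat start i n 0 hf
  simpa using this
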